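-- pv_equiv track=rewrite | github.com/ecolab-nus/helion-mlir | src/helion_mlir/torch_mlir_helper.py | _split_mlir_types
-- ===== SOURCE A (Python) =====
-- def _split_mlir_types(types_str: str) -> list[str]:
--     """Split a comma-separated list of MLIR types, respecting nested <>.
--
--     Example: "tensor<?x?xf16>, tensor<f16>" -> ["tensor<?x?xf16>", "tensor<f16>"]
--     """
--     result = []
--     depth = 0
--     current = []
--     for ch in types_str:
--         if ch == '<':
--             depth += 1
--             current.append(ch)
--         elif ch == '>':
--             depth -= 1
--             current.append(ch)
--         elif ch == ',' and depth == 0: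
--             result.append(''.join(current).strip())
--             current = []
--         else:
--             current.append(ch)
--     if current:
--         result.append(''.join(current).strip())
--     return result
-- ===== SOURCE B (Python) =====
-- def _split_mlir_types(types_str: str) -> list[str]:
--     parts = _split_rec(types_str)
--     if parts[-1] == '':
--         parts.pop()
--     return [p.strip() for p in parts]
--
--
-- def _find_cut(s, depth):
--     """Index of the first comma at bracket depth 0, or None."""
--     for i, ch in enumerate(s):
--         if ch == ',' and depth == 0:
--             return i
--         if ch == '<':
--             depth += 1
--         elif ch == '>':
--             depth -= 1
--     return None
--
--
-- def _split_rec(s):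
--     """Raw (unstripped) fields between top-level commas, by recursion."""
--     i = _find_cut(s, 0)
--     if i is None:
--         return [s]
--     return [s[:i]] + _split_rec(s[i + 1:])
-- ===== Notes on version B (the rewrite author's own statement) =====
-- stated objective: alternative
-- what changed: Replaces A's single accumulator loop (result/depth/current state, strip-on-emit, final flush) by a recursive top-level split: find the first depth-0 comma, slice, recurse; then drop a trailing empty raw field and strip each field in a final map.
import Mathlib
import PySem

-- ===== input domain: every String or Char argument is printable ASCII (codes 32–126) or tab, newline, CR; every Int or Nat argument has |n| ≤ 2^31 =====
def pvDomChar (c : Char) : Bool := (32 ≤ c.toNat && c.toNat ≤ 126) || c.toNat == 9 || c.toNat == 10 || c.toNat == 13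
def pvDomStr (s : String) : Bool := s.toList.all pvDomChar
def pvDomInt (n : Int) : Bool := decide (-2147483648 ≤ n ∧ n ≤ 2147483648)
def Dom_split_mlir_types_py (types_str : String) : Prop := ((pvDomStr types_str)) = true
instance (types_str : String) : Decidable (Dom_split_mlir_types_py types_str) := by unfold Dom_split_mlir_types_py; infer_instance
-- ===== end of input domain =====

-- B splits recursively at the first top-level comma instead of A's one accumulator loop; same O(n) cost, different decomposition.

-- ===== PORT A =====
-- one iteration of A's `for ch in types_str` loop over state (result, depth, current)
def pvAStep (st : List String × Int × List Char) (ch : Char) : List String × Int × List Char :=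
  match st with
  | (result, depth, current) =>
    if ch = '<' then (result, depth + 1, current ++ [ch])
    else if ch = '>' then (result, depth - 1, current ++ [ch])
    else if ch = ',' ∧ depth = 0 then (result ++ [PySem.Str.strip (String.mk current)], depth, [])
    else (result, depth, current ++ [ch])

def split_mlir_types_py (types_str : String) : List String :=
  match types_str.toList.foldl pvAStep ([], 0, []) with
  | (result, _, current) =>
    if current ≠ [] then result ++ [PySem.Str.strip (String.mk current)] else result

-- ===== PORT B =====
-- _find_cut: index of first comma at bracket depth 0 (enumerate-loop as structural recursion, index via +1)
def pvBFind : List Char → Int → Option Nat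
  | [], _ => none
  | ch :: t, depth =>
    if ch = ',' ∧ depth = 0 then some 0
    else
      let d' := if ch = '<' then depth + 1 else if ch = '>' then depth - 1 else depth
      (pvBFind t d').map (· + 1)

theorem pvBFind_lt {s : List Char} {d : Int} {i : Nat} (h : pvBFind s d = some i) : i < s.length := by
  induction s generalizing d i with
  | nil => simp [pvBFind] at h
  | cons ch t ih =>
    rw [pvBFind] at h
    split at h
    · simp only [Option.some.injEq] at h; simp; omega
    · simp only [Option.map_eq_some_iff] at h
      obtain ⟨j, hj, rfl⟩ := h
      have := ih hj
      simp; omega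

-- _split_rec: [s[:i]] + _split_rec(s[i+1:]) at the first top-level comma
def pvBSplitRec (s : List Char) : List (List Char) :=
  match h : pvBFind s 0 with
  | none => [s]
  | some i => s.take i :: pvBSplitRec (s.drop (i + 1))
termination_by s.length
decreasing_by
  have := pvBFind_lt h
  simp; omega

def split_mlir_types_py_alt (types_str : String) : List String :=
  let parts := pvBSplitRec types_str.toList
  let parts := if parts.getLast? = some [] then parts.dropLast else parts
  parts.map (fun p => PySem.Str.strip (String.mk p))

-- ===== PRECONDITION & SPEC =====
def Spec_split_mlir_types_py (types_str : String) (out : List String) : Prop := out = split_mlir_types_py_alt types_str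
instance (types_str : String) (out : List String) : Decidable (Spec_split_mlir_types_py types_str out) := by unfold Spec_split_mlir_types_py; infer_instance

-- ===== CLAIM (what is proved, stated in full; the proofs are below) =====
def Claim_equal_split_mlir_types_py : Prop := ∀ (types_str : String), Dom_split_mlir_types_py types_str → Spec_split_mlir_types_py types_str (split_mlir_types_py types_str)

-- ===== LEMMAS AND PROOFS =====

-- bridge: the list of raw (unstripped) fields, A-shaped (scan with depth and current accumulator)
def pvS : List Char → Int → List Char → List (List Char)
  | [], _, cur => [cur]
  | ch :: t, d, cur =>
    if ch = '<' then pvS t (d + 1) (cur ++ [ch])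
    else if ch = '>' then pvS t (d - 1) (cur ++ [ch])
    else if ch = ',' ∧ d = 0 then cur :: pvS t 0 []
    else pvS t d (cur ++ [ch])

theorem pvS_ne_nil (s : List Char) (d : Int) (cur : List Char) : pvS s d cur ≠ [] := by
  induction s generalizing d cur with
  | nil => simp [pvS]
  | cons ch t ih => rw [pvS]; split_ifs <;> simp [ih]

def pvDropEmptyLast (xs : List (List Char)) : List (List Char) :=
  if xs.getLast? = some [] then xs.dropLast else xs

theorem pvDropEmptyLast_cons {xs : List (List Char)} (h : xs ≠ []) (c : List Char) :
    pvDropEmptyLast (c :: xs) = c :: pvDropEmptyLast xs := by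
  obtain ⟨y, ys, rfl⟩ := List.exists_cons_of_ne_nil h
  unfold pvDropEmptyLast
  rw [List.getLast?_cons_cons]
  split_ifs <;> simp

-- A's result, from any reachable loop state, is res ++ the strip-map of the remaining raw
-- fields (with a trailing empty raw field dropped)
theorem pvA_eq_S (s : List Char) (d : Int) (cur : List Char) (res : List String) :
    (match s.foldl pvAStep (res, d, cur) with
     | (result, _, current) =>
       if current ≠ [] then result ++ [PySem.Str.strip (String.mk current)] else result)
    = res ++ (pvDropEmptyLast (pvS s d cur)).map (fun p => PySem.Str.strip (String.mk p)) := by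
  induction s generalizing d cur res with
  | nil =>
    simp only [List.foldl_nil, pvS, pvDropEmptyLast]
    by_cases hc : cur = [] <;> simp [hc]
  | cons ch t ih =>
    rw [List.foldl_cons, pvAStep, pvS]
    split_ifs with h1 h2 h3
    · exact ih (d + 1) (cur ++ [ch]) res
    · exact ih (d - 1) (cur ++ [ch]) res
    · obtain ⟨-, rfl⟩ := h3
      rw [ih 0 [] (res ++ [PySem.Str.strip (String.mk cur)]),
        pvDropEmptyLast_cons (pvS_ne_nil t 0 []), List.map_cons]
      simp
    · exact ih d (cur ++ [ch]) res

-- B's find-and-slice recursion step, stated against the A-shaped scan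
theorem pvS_eq_find (s : List Char) (d : Int) (cur : List Char) :
    pvS s d cur
    = match pvBFind s d with
      | none => [cur ++ s]
      | some i => (cur ++ s.take i) :: pvS (s.drop (i + 1)) 0 [] := by
  induction s generalizing d cur with
  | nil => simp [pvS, pvBFind]
  | cons ch t ih =>
    rw [pvS, pvBFind]
    by_cases hcomma : ch = ',' ∧ d = 0
    · have hne1 : ¬ ch = '<' := by rintro rfl; exact absurd hcomma.1 (by decide)
      have hne2 : ¬ ch = '>' := by rintro rfl; exact absurd hcomma.1 (by decide)
      rw [if_neg hne1, if_neg hne2, if_pos hcomma, if_pos hcomma]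
      simp
    · rw [if_neg hcomma]
      split_ifs with h1 h2
      · rw [ih (d + 1) (cur ++ [ch])]
        cases hf : pvBFind t (d + 1) <;>
          simp [hf, List.take_succ_cons, List.drop_succ_cons, List.append_assoc]
      · rw [ih (d - 1) (cur ++ [ch])]
        cases hf : pvBFind t (d - 1) <;>
          simp [hf, List.take_succ_cons, List.drop_succ_cons, List.append_assoc]
      · rw [ih d (cur ++ [ch])]
        cases hf : pvBFind t d <;>
          simp [hf, List.take_succ_cons, List.drop_succ_cons, List.append_assoc]

theorem pvBSplitRec_eq_S (s : List Char) : pvBSplitRec s = pvS s 0 [] := by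
  rw [pvS_eq_find]
  rw [pvBSplitRec]
  cases hf : pvBFind s 0 with
  | none => rfl
  | some i =>
    simp only [List.nil_append]
    rw [pvBSplitRec_eq_S (s.drop (i + 1))]
termination_by s.length
decreasing_by
  have := pvBFind_lt hf
  simp; omega

-- ===== VERDICT (by name: the statement is the Claim_ definition above) =====
theorem split_mlir_types_py_spec : Claim_equal_split_mlir_types_py := by
  intro s _
  unfold Spec_split_mlir_types_py split_mlir_types_py split_mlir_types_py_alt
  rw [pvA_eq_S, pvBSplitRec_eq_S]
  rfl
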